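-- pv_equiv track=rewrite | github.com/Yonatan-n/-indeni-rule-interview- | cloudrail/rules/is_name_similar.py | is_name_similar
-- ===== SOURCE A (Python) =====
-- def is_name_similar(name1: str, name2: str) -> bool:
--     index = 0
--     flag = False
--     while index < min(len(name1), len(name2)):
--         if name1[index] != name2[index]:
--             flag = True
--             break
--         index += 1
--     if flag == False and max(len(name1), len(name2)) - index <= 1: # 1 letter diff or less
--         return True
--     if name1[index+1:] == name2[index:] or name1[index:] == name2[index+1:] or (name1[index:]) == (name2[index:]) :
--         return True
--     return False
-- ===== SOURCE B (Python) =====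
-- def is_name_similar(name1: str, name2: str) -> bool:
--     if len(name1) == len(name2):
--         return name1 == name2
--     if abs(len(name1) - len(name2)) != 1:
--         return False
--     longer, shorter = (name1, name2) if len(name1) > len(name2) else (name2, name1)
--     return any(longer[:i] + longer[i + 1:] == shorter for i in range(len(longer)))
-- ===== Notes on version B (the rewrite author's own statement) =====
-- stated objective: simpler
-- what changed: B replaces A's explicit first-mismatch index scan with a length classification: equal lengths means plain string equality, length gap >1 means False, and for a gap of exactly 1 it tests whether deleting some single character of the longer string yields the shorter.
import Mathlib
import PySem

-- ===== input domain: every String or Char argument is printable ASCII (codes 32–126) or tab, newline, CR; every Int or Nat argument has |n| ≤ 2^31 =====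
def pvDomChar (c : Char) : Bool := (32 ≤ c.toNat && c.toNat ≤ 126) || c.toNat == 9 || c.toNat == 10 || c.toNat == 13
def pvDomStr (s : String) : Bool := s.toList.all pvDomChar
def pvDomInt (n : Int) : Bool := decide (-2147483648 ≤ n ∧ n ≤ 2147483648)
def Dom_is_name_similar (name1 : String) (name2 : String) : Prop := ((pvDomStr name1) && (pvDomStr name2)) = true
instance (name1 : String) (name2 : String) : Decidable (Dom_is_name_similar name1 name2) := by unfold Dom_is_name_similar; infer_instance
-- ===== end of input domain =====

-- B replaces A's first-mismatch scan with a length classification plus a try-each-single-deletion test; objective: simpler decomposition (not faster).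


-- ===== PORT A =====
-- A's while loop: advance index while in range and the characters agree; on the first mismatch set the flag and stop.
def pvLoopA (l1 l2 : List Char) (index : Nat) : Nat × Bool :=
  if h : index < min l1.length l2.length then
    if l1[index]'(by omega) ≠ l2[index]'(by omega) then (index, true)
    else pvLoopA l1 l2 (index + 1)
  else (index, false)
termination_by min l1.length l2.length - index

-- body of A on the code-point lists; s[k:] with k ≥ 0 is exactly List.drop k on toList (PySem.List.slice_from_natCast)
def pvABody (l1 l2 : List Char) : Bool :=
  let r := pvLoopA l1 l2 0
  let index := r.1
  let flag := r.2
  if flag = false ∧ max l1.length l2.length - index ≤ 1 then true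
  else if (l1.drop (index + 1) == l2.drop index) || (l1.drop index == l2.drop (index + 1))
          || (l1.drop index == l2.drop index) then true
  else false

def is_name_similar (name1 : String) (name2 : String) : Bool :=
  pvABody name1.toList name2.toList

-- ===== PORT B =====
-- body of B on the code-point lists; longer[:i] = take i (PySem.List.slice_to_natCast), longer[i+1:] = drop (i+1),
-- range(len(longer)) = List.range (PySem.List.pyRange_one with a = 0); Python string == is equality of the char lists.
def pvBBody (l1 l2 : List Char) : Bool :=
  if l1.length = l2.length then l1 == l2
  else if ((l1.length : Int) - (l2.length : Int)).natAbs ≠ 1 then false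
  else
    let p := if l1.length > l2.length then (l1, l2) else (l2, l1)
    (List.range p.1.length).any (fun i => (p.1.take i ++ p.1.drop (i + 1)) == p.2)

def is_name_similar_alt (name1 : String) (name2 : String) : Bool :=
  pvBBody name1.toList name2.toList

-- ===== PRECONDITION & SPEC =====
def Spec_is_name_similar (name1 : String) (name2 : String) (out : Bool) : Prop := out = is_name_similar_alt name1 name2
instance (name1 : String) (name2 : String) (out : Bool) : Decidable (Spec_is_name_similar name1 name2 out) := by unfold Spec_is_name_similar; infer_instance

-- ===== CLAIM (what is proved, stated in full; the proofs are below) =====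
def Claim_equal_is_name_similar : Prop := ∀ (name1 : String) (name2 : String), Dom_is_name_similar name1 name2 → Spec_is_name_similar name1 name2 (is_name_similar name1 name2)

-- ===== LEMMAS AND PROOFS =====

-- pvIsDel s l = true iff deleting one character of l yields s (the common value both programs compute, via pvSim)
def pvIsDel : List Char → List Char → Bool
  | _, [] => false
  | [], _ :: ys => [] == ys
  | x :: xs, y :: ys => (x :: xs == ys) || ((x == y) && pvIsDel xs ys)

def pvSim (a b : List Char) : Bool := (a == b) || pvIsDel a b || pvIsDel b a

theorem pvIsDel_nil_cons (y : Char) (ys : List Char) : pvIsDel [] (y :: ys) = ([] == ys) := rfl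

theorem pvIsDel_cons_cons (x y : Char) (xs ys : List Char) :
    pvIsDel (x :: xs) (y :: ys) = ((x :: xs == ys) || ((x == y) && pvIsDel xs ys)) := rfl

theorem pvIsDel_self_cons (x : Char) (xs : List Char) : pvIsDel xs (x :: xs) = true := by
  cases xs with
  | nil => simp [pvIsDel]
  | cons z zs => simp [pvIsDel]

theorem pvIsDel_length : ∀ (s l : List Char), pvIsDel s l = true → l.length = s.length + 1 := by
  intro s l
  induction l generalizing s with
  | nil => simp [pvIsDel]
  | cons y ys ih =>
    cases s with
    | nil =>
      simp only [pvIsDel, beq_iff_eq]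
      intro h; simp [← h]
    | cons x xs =>
      simp only [pvIsDel, Bool.or_eq_true, Bool.and_eq_true, beq_iff_eq]
      rintro (h | ⟨-, h⟩)
      · simp [← h]
      · simpa using ih xs h

theorem pvLoopA_shift (x y : Char) : ∀ (l1 l2 : List Char) (i : Nat),
    pvLoopA (x :: l1) (y :: l2) (i + 1) = ((pvLoopA l1 l2 i).1 + 1, (pvLoopA l1 l2 i).2) := by
  intro l1 l2 i
  fun_induction pvLoopA l1 l2 i with
  | case1 i hlt hne =>
    rw [pvLoopA, dif_pos (by simp only [List.length_cons]; omega)]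
    simp only [List.getElem_cons_succ]
    rw [if_pos hne]
  | case2 i hlt heq ih =>
    rw [pvLoopA, dif_pos (by simp only [List.length_cons]; omega)]
    simp only [List.getElem_cons_succ]
    rw [if_neg heq]
    exact ih
  | case3 i hge =>
    rw [pvLoopA, dif_neg (by simp only [List.length_cons]; omega)]

theorem pvABody_cons_eq (x : Char) (l1 l2 : List Char) :
    pvABody (x :: l1) (x :: l2) = pvABody l1 l2 := by
  unfold pvABody
  have h0 : pvLoopA (x :: l1) (x :: l2) 0 = ((pvLoopA l1 l2 0).1 + 1, (pvLoopA l1 l2 0).2) := by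
    rw [pvLoopA, dif_pos (by simp only [List.length_cons]; omega)]
    simp only [List.getElem_cons_zero]
    rw [if_neg (by simp)]
    exact pvLoopA_shift x x l1 l2 0
  rw [h0]
  simp only [List.length_cons, List.drop_succ_cons, Nat.succ_max_succ, Nat.succ_sub_succ]
  rfl

theorem pvABody_mismatch (x y : Char) (hxy : x ≠ y) (l1 l2 : List Char) :
    pvABody (x :: l1) (y :: l2) = ((l1 == y :: l2) || (x :: l1 == l2)) := by
  unfold pvABody
  have h0 : pvLoopA (x :: l1) (y :: l2) 0 = (0, true) := by
    rw [pvLoopA, dif_pos (by simp only [List.length_cons]; omega)]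
    simp [hxy]
  rw [h0]
  rw [Bool.eq_iff_iff]
  simp [hxy]

theorem pvABody_nil_left (l2 : List Char) : pvABody [] l2 = decide (l2.length ≤ 1) := by
  unfold pvABody
  have h0 : pvLoopA [] l2 0 = (0, false) := by rw [pvLoopA, dif_neg (by simp)]
  rw [h0]
  rw [Bool.eq_iff_iff]
  simp only [List.length_nil, List.drop_nil, List.drop_zero, Nat.zero_max, Nat.sub_zero]
  by_cases h : l2.length ≤ 1
  · simp [h]
  · rw [if_neg (by simp [h])]
    cases l2 with
    | nil => simp at h
    | cons a as =>
      cases as with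
      | nil => simp at h
      | cons b bs => simp

theorem pvABody_nil_right (l1 : List Char) : pvABody l1 [] = decide (l1.length ≤ 1) := by
  unfold pvABody
  have h0 : pvLoopA l1 [] 0 = (0, false) := by rw [pvLoopA, dif_neg (by simp)]
  rw [h0]
  rw [Bool.eq_iff_iff]
  simp only [List.length_nil, List.drop_nil, List.drop_zero, Nat.max_zero, Nat.sub_zero]
  by_cases h : l1.length ≤ 1
  · simp [h]
  · rw [if_neg (by simp [h])]
    cases l1 with
    | nil => simp at h
    | cons a as =>
      cases as with
      | nil => simp at h
      | cons b bs => simp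

theorem pvSim_cons_eq (x : Char) (xs ys : List Char) :
    pvSim (x :: xs) (x :: ys) = pvSim xs ys := by
  unfold pvSim
  simp only [pvIsDel_cons_cons]
  rw [Bool.eq_iff_iff]
  have k1 : (x :: xs = ys) → pvIsDel xs ys = true := fun h => h ▸ pvIsDel_self_cons x xs
  have k2 : (x :: ys = xs) → pvIsDel ys xs = true := fun h => h ▸ pvIsDel_self_cons x ys
  simp only [Bool.or_eq_true, Bool.and_eq_true, beq_iff_eq, List.cons.injEq, true_and]
  tauto

theorem pvABody_eq_pvSim : ∀ (a b : List Char), pvABody a b = pvSim a b := by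
  intro a
  induction a with
  | nil =>
    intro b
    rw [pvABody_nil_left]
    cases b with
    | nil => simp [pvSim, pvIsDel]
    | cons y ys =>
      unfold pvSim
      rw [pvIsDel_nil_cons, Bool.eq_iff_iff]
      cases ys with
      | nil => simp [pvIsDel]
      | cons z zs => simp [pvIsDel]
  | cons x xs ih =>
    intro b
    cases b with
    | nil =>
      rw [pvABody_nil_right]
      unfold pvSim
      rw [pvIsDel_nil_cons, Bool.eq_iff_iff]
      cases xs with
      | nil => simp [pvIsDel]
      | cons z zs => simp [pvIsDel]
    | cons y ys =>
      by_cases hxy : x = y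
      · subst hxy
        rw [pvABody_cons_eq, pvSim_cons_eq]
        exact ih ys
      · rw [pvABody_mismatch x y hxy]
        unfold pvSim
        rw [pvIsDel_cons_cons, pvIsDel_cons_cons, Bool.eq_iff_iff]
        have hxy' : ¬ y = x := fun h => hxy h.symm
        simp only [Bool.or_eq_true, Bool.and_eq_true, beq_iff_eq, List.cons.injEq]
        constructor
        · rintro (h | h)
          · exact Or.inr (Or.inl h.symm)
          · exact Or.inl (Or.inr (Or.inl h))
        · rintro ((⟨h, -⟩ | h | ⟨h, -⟩) | (h | ⟨h, -⟩))
          · exact absurd h hxy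
          · exact Or.inr h
          · exact absurd h hxy
          · exact Or.inl h.symm
          · exact absurd h hxy'

theorem pvAny_delete : ∀ (l s : List Char),
    ((List.range l.length).any (fun i => (l.take i ++ l.drop (i + 1)) == s)) = pvIsDel s l := by
  intro l
  induction l with
  | nil => intro s; simp [pvIsDel]
  | cons y ys ih =>
    intro s
    rw [List.length_cons, List.range_succ_eq_map]
    simp only [List.any_cons, List.any_map]
    cases s with
    | nil =>
      rw [Bool.eq_iff_iff]
      simp only [pvIsDel_nil_cons, Function.comp_apply, List.take_succ_cons, List.cons_append,
        Bool.or_eq_true, List.any_eq_true, List.mem_range, beq_iff_eq, List.take_zero,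
        List.nil_append, List.drop_succ_cons]
      constructor
      · rintro (h | ⟨i, hi, h⟩)
        · exact h.symm
        · simp at h
      · intro h; exact Or.inl h.symm
    | cons x xs =>
      rw [Bool.eq_iff_iff]
      have hIH := ih xs
      rw [Bool.eq_iff_iff] at hIH
      simp only [pvIsDel_cons_cons, Bool.or_eq_true, List.any_eq_true, List.mem_range,
        Function.comp_apply, beq_iff_eq, List.take_zero, List.nil_append, List.drop_succ_cons,
        List.take_succ_cons, List.cons_append, List.cons.injEq, Bool.and_eq_true] at *
      constructor
      · rintro (h | ⟨i, hi, hy, hdel⟩)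
        · exact Or.inl h.symm
        · exact Or.inr ⟨hy.symm, hIH.mp ⟨i, hi, hdel⟩⟩
      · rintro (h | ⟨hy, hdel⟩)
        · exact Or.inl h.symm
        · obtain ⟨i, hi, hdel'⟩ := hIH.mpr hdel
          exact Or.inr ⟨i, hi, hy.symm, hdel'⟩

theorem pvBBody_eq_pvSim : ∀ (a b : List Char), pvBBody a b = pvSim a b := by
  intro a b
  unfold pvBBody pvSim
  have h1 : ¬ b.length = a.length + 1 → pvIsDel a b = false := by
    intro h; cases hd : pvIsDel a b
    · rfl
    · exact absurd (pvIsDel_length a b hd) h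
  have h2 : ¬ a.length = b.length + 1 → pvIsDel b a = false := by
    intro h; cases hd : pvIsDel b a
    · rfl
    · exact absurd (pvIsDel_length b a hd) h
  by_cases hlen : a.length = b.length
  · rw [if_pos hlen, h1 (by omega), h2 (by omega)]
    simp
  · rw [if_neg hlen]
    have hab : (a == b) = false := by
      simpa using fun h => hlen (by rw [h])
    by_cases hgap : ((a.length : Int) - (b.length : Int)).natAbs ≠ 1
    · rw [if_pos hgap]
      have hg : ¬ (a.length = b.length + 1) ∧ ¬ (b.length = a.length + 1) := by
        constructor <;> intro h <;> exact hgap (by simp [h])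
      rw [h1 hg.2, h2 hg.1, hab]
      rfl
    · rw [if_neg hgap]
      simp only [ne_eq, Decidable.not_not] at hgap
      by_cases hgt : a.length > b.length
      · rw [if_pos hgt]
        have hd2 : pvIsDel a b = false := h1 (by omega)
        rw [hab, hd2]
        simp only [Bool.false_or]
        exact pvAny_delete a b
      · rw [if_neg hgt]
        have hd1 : pvIsDel b a = false := h2 (by omega)
        rw [hab, hd1]
        simp only [Bool.false_or, Bool.or_false]
        exact pvAny_delete b a

-- ===== VERDICT (by name: the statement is the Claim_ definition above) =====
theorem is_name_similar_spec : Claim_equal_is_name_similar := by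
  intro name1 name2 _
  unfold Spec_is_name_similar is_name_similar is_name_similar_alt
  rw [pvABody_eq_pvSim, pvBBody_eq_pvSim]
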